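-- pv_equiv track=rewrite | github.com/taka-y-0820/python-ai-basics | fibonacci_efficient.py | generate_pyramid_lines
-- ===== SOURCE A (Python) =====
-- def generate_pyramid_lines(sequence: list[int], depth: int) -> list[str]:
--     """
--     Generates a list of strings representing the centered lines
--     of the Fibonacci pyramid up to the specified depth.
--     """
--     if depth < 1:
--         return []
--
--     lines = []
--     index = 0
--
--     for row in range(1, depth + 1):
--         # Calculate the required number of elements for the current row
--         end_index = index + row
--
--         # Check if sequence has enough elements (robustness)
--         if end_index > len(sequence):
--             break
--
--         line = ' '.join(map(str, sequence[index:end_index]))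
--         lines.append(line)
--         index = end_index
--
--     return lines
-- ===== SOURCE B (Python) =====
-- def generate_pyramid_lines(sequence: list[int], depth: int) -> list[str]:
--     out = []
--     cur = []
--     for x in sequence:
--         if len(out) >= depth:
--             break
--         cur.append(str(x))
--         if len(cur) > len(out):
--             out.append(' '.join(cur))
--             cur = []
--     return out
-- ===== Notes on version B (the rewrite author's own statement) =====
-- stated objective: alternative
-- what changed: A iterates over row numbers, slicing a row-sized chunk out of the sequence with a running index and breaking when a slice would not fit; B never slices: it makes a single element-wise pass over the sequence, accumulating the current row in a buffer and flushing the joined buffer to the output whenever the buffer grows longer than the number of rows emitted so far, stopping once depth rows are out.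
import Mathlib
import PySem

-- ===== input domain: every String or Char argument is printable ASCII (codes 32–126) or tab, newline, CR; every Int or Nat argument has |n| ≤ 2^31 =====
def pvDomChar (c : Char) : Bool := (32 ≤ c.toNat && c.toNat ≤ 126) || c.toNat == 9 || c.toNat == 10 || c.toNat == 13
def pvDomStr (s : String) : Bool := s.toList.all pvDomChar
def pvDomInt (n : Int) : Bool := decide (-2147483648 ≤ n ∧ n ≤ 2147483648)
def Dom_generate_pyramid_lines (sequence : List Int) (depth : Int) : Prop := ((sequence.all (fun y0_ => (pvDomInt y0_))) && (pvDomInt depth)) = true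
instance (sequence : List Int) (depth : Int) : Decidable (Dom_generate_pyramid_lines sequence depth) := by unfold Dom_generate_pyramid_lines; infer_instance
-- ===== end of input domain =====

-- B replaces A's row-by-row loop (running index, slicing a row out of the sequence, break when a
-- slice would not fit) by a single element-wise pass that accumulates the current row in a buffer
-- and flushes it when full (objective: alternative).

-- ===== PORT A =====
-- A's for-loop over row = 1..depth with the running `index`, the slice, the `break`, `lines.append`.
def pyA_loop (sequence : List Int) (row depth index : Int) (lines : List String) : List String :=
  if row > depth then lines  -- range(1, depth + 1) exhausted
  else
    let end_index := index + row
    if end_index > (sequence.length : Int) then lines  -- break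
    else pyA_loop sequence (row + 1) depth end_index
      (lines ++ [PySem.Str.join " " ((PySem.List.slice sequence (some index) (some end_index)).map PySem.Int.toStr)])
termination_by (depth + 1 - row).toNat
decreasing_by omega

def generate_pyramid_lines (sequence : List Int) (depth : Int) : List String :=
  if depth < 1 then []
  else pyA_loop sequence 1 depth 0 []

-- ===== PORT B =====
-- B's for-loop over the ELEMENTS of sequence: break once depth rows are out, append str(x) to the
-- current-row buffer, flush the joined buffer when it outgrows the emitted-row count.
def bLoop (depth : Int) : List Int → List String → List String → List String
  | [], out, _ => out
  | x :: xs, out, cur =>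
    if (out.length : Int) ≥ depth then out  -- break
    else
      let cur' := cur ++ [PySem.Int.toStr x]
      if cur'.length > out.length then
        bLoop depth xs (out ++ [PySem.Str.join " " cur']) []
      else
        bLoop depth xs out cur'

def generate_pyramid_lines_alt (sequence : List Int) (depth : Int) : List String :=
  bLoop depth sequence [] []

-- ===== PRECONDITION & SPEC =====
def Spec_generate_pyramid_lines (sequence : List Int) (depth : Int) (out : List String) : Prop := out = generate_pyramid_lines_alt sequence depth
instance (sequence : List Int) (depth : Int) (out : List String) : Decidable (Spec_generate_pyramid_lines sequence depth out) := by unfold Spec_generate_pyramid_lines; infer_instance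

-- ===== CLAIM (what is proved, stated in full; the proofs are below) =====
def Claim_equal_generate_pyramid_lines : Prop := ∀ (sequence : List Int) (depth : Int), Dom_generate_pyramid_lines sequence depth → Spec_generate_pyramid_lines sequence depth (generate_pyramid_lines sequence depth)

-- ===== LEMMAS AND PROOFS =====

-- common reference value: the rows of sizes r, r+1, … taken from the front of xs,
-- at most b of them, stopping as soon as a row does not fit
def specRows : List Int → Nat → Nat → List String
  | _, _, 0 => []
  | xs, r, Nat.succ b =>
    if xs.length < r then []
    else PySem.Str.join " " ((xs.take r).map PySem.Int.toStr) :: specRows (xs.drop r) (r + 1) b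

lemma A_loop_eq (sequence : List Int) (depth : Int) :
    ∀ (b : Nat) (row index : Int) (acc : List String),
      1 ≤ row → 0 ≤ index → index ≤ (sequence.length : Int) → (depth + 1 - row).toNat = b →
      pyA_loop sequence row depth index acc
        = acc ++ specRows (sequence.drop index.toNat) row.toNat b := by
  intro b
  induction b with
  | zero =>
    intro row index acc h1 h0 hlen hb
    rw [pyA_loop, if_pos (by omega)]
    simp [specRows]
  | succ k ih =>
    intro row index acc h1 h0 hlen hb
    rw [pyA_loop, if_neg (by omega)]
    simp only []
    have hdroplen : (sequence.drop index.toNat).length = sequence.length - index.toNat := by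
      simp
    by_cases hbig : index + row > (sequence.length : Int)
    · rw [if_pos hbig]
      rw [specRows, if_pos (by omega)]
      simp
    · rw [if_neg hbig]
      rw [ih (row + 1) (index + row)
            (acc ++ [PySem.Str.join " " ((PySem.List.slice sequence (some index) (some (index + row))).map PySem.Int.toStr)])
            (by omega) (by omega) (by omega) (by omega)]
      rw [specRows, if_neg (by omega)]
      rw [PySem.List.slice_toNat sequence h0 (by omega)]
      have htk : (index + row).toNat - index.toNat = row.toNat := by omega
      have hdd : sequence.drop (index + row).toNat = (sequence.drop index.toNat).drop row.toNat := by
        rw [List.drop_drop]; congr 1; omega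
      have hr1 : (row + 1).toNat = row.toNat + 1 := by omega
      rw [htk, hdd, hr1]
      simp

-- consuming one row of size m: cur already holds the first elements of the row,
-- m more are needed to fill it
lemma B_fill (depth : Int) :
    ∀ (m : Nat) (xs : List Int) (out cur : List String),
      0 < m → cur.length + m = out.length + 1 → (out.length : Int) < depth →
      bLoop depth xs out cur
        = if xs.length < m then out
          else bLoop depth (xs.drop m)
                 (out ++ [PySem.Str.join " " (cur ++ (xs.take m).map PySem.Int.toStr)]) [] := by
  intro m
  induction m with
  | zero => intro xs out cur hm; omega
  | succ k ih =>
    intro xs out cur hm hcur hd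
    cases xs with
    | nil => rw [bLoop]; simp
    | cons x xs =>
      rw [bLoop, if_neg (by omega)]
      simp only []
      rcases Nat.eq_zero_or_pos k with hk | hk
      · subst hk
        rw [if_pos (by simp; omega)]
        rw [if_neg (by simp)]
        simp
      · rw [if_neg (by simp; omega)]
        rw [ih xs out (cur ++ [PySem.Int.toStr x]) hk (by simp; omega) hd]
        simp only [List.length_cons, List.take_succ_cons, List.drop_succ_cons,
          Nat.add_lt_add_iff_right, List.map_cons]
        congr 2
        simp

lemma B_rows (depth : Int) :
    ∀ (b : Nat) (xs : List Int) (out : List String),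
      (depth - (out.length : Int)).toNat = b →
      bLoop depth xs out [] = out ++ specRows xs (out.length + 1) b := by
  intro b
  induction b with
  | zero =>
    intro xs out hb
    cases xs with
    | nil => rw [bLoop]; simp [specRows]
    | cons x xs => rw [bLoop, if_pos (by omega)]; simp [specRows]
  | succ k ih =>
    intro xs out hb
    rw [B_fill depth (out.length + 1) xs out [] (by omega) (by simp) (by omega)]
    by_cases hlt : xs.length < out.length + 1
    · rw [if_pos hlt, specRows, if_pos hlt]
      simp
    · rw [if_neg hlt]
      rw [ih (xs.drop (out.length + 1))
            (out ++ [PySem.Str.join " " ([] ++ (xs.take (out.length + 1)).map PySem.Int.toStr)])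
            (by simp; omega)]
      rw [specRows, if_neg hlt]
      simp

-- ===== VERDICT (by name: the statement is the Claim_ definition above) =====
theorem generate_pyramid_lines_spec : Claim_equal_generate_pyramid_lines := by
  intro sequence depth _
  unfold Spec_generate_pyramid_lines generate_pyramid_lines generate_pyramid_lines_alt
  rw [B_rows depth depth.toNat sequence [] (by simp)]
  by_cases hd : depth < 1
  · rw [if_pos hd]
    have : depth.toNat = 0 := by omega
    simp [this, specRows]
  · rw [if_neg hd]
    rw [A_loop_eq sequence depth depth.toNat 1 0 [] (by omega) (by omega) (by simp) (by omega)]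
    simp
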